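-- pv_equiv track=rewrite | github.com/VictorDron/StoneLive.py | analysis/base_1.py | getBaseCountsByDate
-- ===== SOURCE A (Python) =====
-- def getBaseCountsByDate(data):
--     countsByDate = {}
--     for row in data:
--         date = row['date']
--         base = row['base']
--         if date not in countsByDate:
--             countsByDate[date] = {}
--         if base not in countsByDate[date]:
--             countsByDate[date][base] = 1
--         else:
--             countsByDate[date][base] += 1
--     return countsByDate
-- ===== SOURCE B (Python) =====
-- def getBaseCountsByDate(data):
--     grouped = {}
--     for row in data:
--         grouped.setdefault(row['date'], []).append(row['base'])
--     return {date: {b: bases.count(b) for b in dict.fromkeys(bases)}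
--             for date, bases in grouped.items()}
-- ===== Notes on version B (the rewrite author's own statement) =====
-- stated objective: alternative
-- what changed: B replaces A's single-pass incremental nested-dict counting with a two-phase decomposition: first group all base values per date into lists via setdefault/append, then build each date's counts dict by counting occurrences of each distinct base (dict.fromkeys + list.count).
import Mathlib
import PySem

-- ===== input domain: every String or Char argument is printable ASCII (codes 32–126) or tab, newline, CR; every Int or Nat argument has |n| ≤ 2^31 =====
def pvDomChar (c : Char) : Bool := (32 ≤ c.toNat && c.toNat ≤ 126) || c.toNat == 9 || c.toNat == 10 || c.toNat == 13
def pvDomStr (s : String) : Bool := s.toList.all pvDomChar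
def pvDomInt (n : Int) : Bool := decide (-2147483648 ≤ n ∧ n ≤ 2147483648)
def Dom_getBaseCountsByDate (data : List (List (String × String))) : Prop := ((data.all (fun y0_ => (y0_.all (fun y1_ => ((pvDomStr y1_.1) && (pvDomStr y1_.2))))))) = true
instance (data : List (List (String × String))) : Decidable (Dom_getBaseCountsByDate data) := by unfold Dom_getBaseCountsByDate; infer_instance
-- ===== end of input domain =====

-- B changes the decomposition only (group per date, then count each distinct base); same return value as A on Pre_.

-- ===== PORT A =====
-- A: one pass, building a nested dict of counts incrementally (row['date'] / row['base'] = Dict lookup; KeyError excluded by Pre_).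
def getBaseCountsByDate (data : List (List (String × String))) : List (String × List (String × Int)) :=
  let countsByDate :=
    data.foldl (fun acc row =>
      let date := ((PySem.Dict.ofList row).get? "date").getD ""
      let base := ((PySem.Dict.ofList row).get? "base").getD ""
      let acc := if acc.contains date then acc else acc.insert date PySem.Dict.empty
      let inner := acc.getD date PySem.Dict.empty
      if inner.contains base then acc.insert date (inner.modify base 0 (· + 1))
      else acc.insert date (inner.insert base 1)) PySem.Dict.empty
  countsByDate.items.map (fun q => (q.1, q.2.items))

-- ===== PORT B =====
-- B: first pass groups base values per date (setdefault/append = modify with [] default);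
-- second pass turns each group into counts via dict.fromkeys (= dedup) and list.count.
def getBaseCountsByDate_alt (data : List (List (String × String))) : List (String × List (String × Int)) :=
  let grouped :=
    data.foldl (fun g row =>
      g.modify (((PySem.Dict.ofList row).get? "date").getD "") []
        (fun bs => bs ++ [((PySem.Dict.ofList row).get? "base").getD ""])) PySem.Dict.empty
  grouped.items.map (fun q => (q.1, (PySem.List.dedup q.2).map (fun b => (b, (q.2.count b : Int)))))

-- ===== PRECONDITION & SPEC =====
-- Pre_: every row has both the 'date' and the 'base' key — otherwise the Python A raises KeyError (and B raises too).
def Pre_getBaseCountsByDate (data : List (List (String × String))) : Prop :=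
  (data.all (fun row => (PySem.Dict.ofList row).contains "date" && (PySem.Dict.ofList row).contains "base")) = true
instance (data : List (List (String × String))) : Decidable (Pre_getBaseCountsByDate data) := by unfold Pre_getBaseCountsByDate; infer_instance
def pvWitness_getBaseCountsByDate : (List (List (String × String))) :=
  [[("date", "2020-01-01"), ("base", "A")], [("date", "2020-01-01"), ("base", "B")], [("date", "2020-01-02"), ("base", "A")]]

def Spec_getBaseCountsByDate (data : List (List (String × String))) (out : List (String × List (String × Int))) : Prop := out = getBaseCountsByDate_alt data
instance (data : List (List (String × String))) (out : List (String × List (String × Int))) : Decidable (Spec_getBaseCountsByDate data out) := by unfold Spec_getBaseCountsByDate; infer_instance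

-- ===== CLAIM (what is proved, stated in full; the proofs are below) =====
def Claim_equal_getBaseCountsByDate : Prop := ∀ (data : List (List (String × String))), Dom_getBaseCountsByDate data → Pre_getBaseCountsByDate data → Spec_getBaseCountsByDate data (getBaseCountsByDate data)

-- ===== LEMMAS AND PROOFS =====

-- the (date, base) pair both loops extract from a row
def pvKeyPair (row : List (String × String)) : String × String :=
  (((PySem.Dict.ofList row).get? "date").getD "", ((PySem.Dict.ofList row).get? "base").getD "")

-- A's loop body, on the extracted pair
def pvStepA (acc : PySem.Dict String (PySem.Dict String Int)) (p : String × String) :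
    PySem.Dict String (PySem.Dict String Int) :=
  let acc := if acc.contains p.1 then acc else acc.insert p.1 PySem.Dict.empty
  let inner := acc.getD p.1 PySem.Dict.empty
  if inner.contains p.2 then acc.insert p.1 (inner.modify p.2 0 (· + 1))
  else acc.insert p.1 (inner.insert p.2 1)

-- B's grouping loop body, on the extracted pair
def pvStepG (g : PySem.Dict String (List String)) (p : String × String) :
    PySem.Dict String (List String) :=
  g.modify p.1 [] (fun bs => bs ++ [p.2])

-- counter applied valuewise: the bridge between B's grouped lists and A's nested count dicts
def pvFc (g : PySem.Dict String (List String)) : PySem.Dict String (PySem.Dict String Int) :=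
  ⟨g.items.map (fun q => (q.1, PySem.Dict.counter q.2))⟩

theorem pvFc_contains (g : PySem.Dict String (List String)) (d : String) :
    (pvFc g).contains d = g.contains d := by
  simp [pvFc, PySem.Dict.contains, Function.comp_def]

theorem pvFc_get? (g : PySem.Dict String (List String)) (d : String) :
    (pvFc g).get? d = (g.get? d).map (fun bs => PySem.Dict.counter bs) := by
  simp [pvFc, PySem.Dict.get?, List.find?_map, Function.comp_def, Option.map_map]

theorem pvFc_getD (g : PySem.Dict String (List String)) (d : String) :
    (pvFc g).getD d PySem.Dict.empty = PySem.Dict.counter (g.getD d []) := by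
  simp only [PySem.Dict.getD, pvFc_get?]
  cases g.get? d <;> rfl

theorem pvFc_insert (g : PySem.Dict String (List String)) (d : String) (w : List String) :
    pvFc (g.insert d w) = (pvFc g).insert d (PySem.Dict.counter w) := by
  apply PySem.Dict.ext
  simp only [PySem.Dict.insert, pvFc_contains]
  by_cases hc : g.contains d = true
  · simp only [hc, if_true, pvFc, List.map_map]
    apply List.map_congr_left
    intro p _
    by_cases h : p.1 = d <;> simp [h]
  · simp [hc, pvFc]

theorem counter_snoc (bs : List String) (b : String) :
    PySem.Dict.counter (bs ++ [b]) = (PySem.Dict.counter bs).modify b 0 (· + 1) := by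
  simp [PySem.Dict.counter, List.foldl_append]

-- A's branchy body collapses to one modify
theorem pvStepA_collapse (acc : PySem.Dict String (PySem.Dict String Int)) (p : String × String) :
    pvStepA acc p = acc.insert p.1 ((acc.getD p.1 PySem.Dict.empty).modify p.2 0 (· + 1)) := by
  unfold pvStepA
  by_cases hc : acc.contains p.1 = true
  · simp only [hc, if_true]
    by_cases hb : (acc.getD p.1 PySem.Dict.empty).contains p.2 = true
    · simp [hb]
    · simp [hb, PySem.Dict.modify,
        PySem.Dict.getD_of_not_contains _ _ (Bool.of_not_eq_true hb)]
  · simp only [hc, Bool.false_eq_true, if_false,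
      PySem.Dict.getD_insert_self, PySem.Dict.contains_empty, PySem.Dict.insert_insert_self,
      PySem.Dict.getD_of_not_contains _ _ (Bool.of_not_eq_true hc)]
    simp [PySem.Dict.modify]

theorem pvStep_comm (g : PySem.Dict String (List String)) (p : String × String) :
    pvStepA (pvFc g) p = pvFc (pvStepG g p) := by
  rw [pvStepA_collapse, pvFc_getD, ← counter_snoc, pvStepG, PySem.Dict.modify, pvFc_insert]

theorem pvFold_comm (l : List (String × String)) (g : PySem.Dict String (List String)) :
    l.foldl pvStepA (pvFc g) = pvFc (l.foldl pvStepG g) := by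
  induction l generalizing g with
  | nil => rfl
  | cons p l ih => simp only [List.foldl_cons, pvStep_comm, ih]

-- ===== VERDICT (by name: the statement is the Claim_ definition above) =====
theorem getBaseCountsByDate_spec : Claim_equal_getBaseCountsByDate := by
  intro data _ _
  unfold Spec_getBaseCountsByDate getBaseCountsByDate getBaseCountsByDate_alt
  have hA : data.foldl (fun acc row =>
      let date := ((PySem.Dict.ofList row).get? "date").getD ""
      let base := ((PySem.Dict.ofList row).get? "base").getD ""
      let acc := if acc.contains date then acc else acc.insert date PySem.Dict.empty
      let inner := acc.getD date PySem.Dict.empty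
      if inner.contains base then acc.insert date (inner.modify base 0 (· + 1))
      else acc.insert date (inner.insert base 1)) PySem.Dict.empty
      = (data.map pvKeyPair).foldl pvStepA (pvFc PySem.Dict.empty) := by
    rw [List.foldl_map]; rfl
  have hB : data.foldl (fun g row =>
      g.modify (((PySem.Dict.ofList row).get? "date").getD "") []
        (fun bs => bs ++ [((PySem.Dict.ofList row).get? "base").getD ""])) PySem.Dict.empty
      = (data.map pvKeyPair).foldl pvStepG PySem.Dict.empty := by
    rw [List.foldl_map]; rfl
  simp only [hA, hB, pvFold_comm]
  simp [pvFc, List.map_map, PySem.Dict.items_counter, PySem.List.dedup, Function.comp_def]
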